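-- pv_equiv track=rewrite | github.com/Samsamp02/PyAssignment4 | d4Partie1.py | transl
-- ===== SOURCE A (Python) =====
-- def transl(d,s):
--     for motAnglais,motFrancais in d.items():
--         if(motAnglais == s):
--             s = motFrancais
--             return s
--         elif(motFrancais == s):
--             s = motAnglais
--             return s
--         elif(s not in d.values() and s not in d.keys()):
--             s = "Unknown"
--             return s
-- ===== SOURCE B (Python) =====
-- def transl(d, s):
--     if not d:
--         return None
--     m = {}
--     for k, v in d.items():
--         m.setdefault(k, v)
--         m.setdefault(v, k)
--     return m.get(s, "Unknown")
-- ===== Notes on version B (the rewrite author's own statement) =====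
-- stated objective: idiomatic
-- what changed: Replaces A's early-return scan (with a global values()/keys() membership test inside the loop) by building one bidirectional first-wins lookup table with setdefault and doing a single m.get(s, 'Unknown').
import Mathlib
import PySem

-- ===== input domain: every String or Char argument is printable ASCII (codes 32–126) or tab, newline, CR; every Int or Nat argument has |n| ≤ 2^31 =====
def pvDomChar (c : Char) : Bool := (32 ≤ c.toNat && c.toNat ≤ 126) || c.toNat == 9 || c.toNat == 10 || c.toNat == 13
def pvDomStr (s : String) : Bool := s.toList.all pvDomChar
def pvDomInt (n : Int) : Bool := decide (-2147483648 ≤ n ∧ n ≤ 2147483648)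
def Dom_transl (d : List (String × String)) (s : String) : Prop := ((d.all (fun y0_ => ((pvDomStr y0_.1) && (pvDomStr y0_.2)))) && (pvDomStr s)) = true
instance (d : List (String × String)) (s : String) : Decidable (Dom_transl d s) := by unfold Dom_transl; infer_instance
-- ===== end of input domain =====

-- B builds one bidirectional first-wins lookup table (dict.setdefault) and does a single get,
-- instead of A's early-return scan with a global keys/values membership test inside the loop.


-- ===== PORT A =====
-- the loop body; `d` stays the whole dict because the elif tests `s not in d.values()`
-- and `s not in d.keys()` against the WHOLE dict on every iteration
def translGo (d : List (String × String)) (s : String) : List (String × String) → Option String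
  | [] => none                                   -- loop falls through: implicit `return None`
  | (motAnglais, motFrancais) :: rest =>
    if motAnglais = s then some motFrancais
    else if motFrancais = s then some motAnglais
    else if s ∉ d.map Prod.snd ∧ s ∉ d.map Prod.fst then some "Unknown"
    else translGo d s rest

def transl (d : List (String × String)) (s : String) : Option String :=
  translGo d s d

-- ===== PORT B =====
-- m.setdefault(k, v): insert only if the key is absent (first insertion wins)
def translStep (m : PySem.Dict String String) (kv : String × String) : PySem.Dict String String :=
  (m.setdefault kv.1 kv.2).setdefault kv.2 kv.1

def transl_alt (d : List (String × String)) (s : String) : Option String :=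
  if d = [] then none
  else some ((d.foldl translStep PySem.Dict.empty).getD s "Unknown")

-- ===== PRECONDITION & SPEC =====
def Spec_transl (d : List (String × String)) (s : String) (out : Option String) : Prop := out = transl_alt d s
instance (d : List (String × String)) (s : String) (out : Option String) : Decidable (Spec_transl d s out) := by unfold Spec_transl; infer_instance

-- ===== CLAIM (what is proved, stated in full; the proofs are below) =====
def Claim_equal_transl : Prop := ∀ (d : List (String × String)) (s : String), Dom_transl d s → Spec_transl d s (transl d s)

-- ===== LEMMAS AND PROOFS =====

-- first match in `d`, key before value within a pair
def pvScan (s : String) : List (String × String) → Option String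
  | [] => none
  | (k, v) :: r => if k = s then some v else if v = s then some k else pvScan s r

theorem pvStep_get (m : PySem.Dict String String) (k v s : String) :
    (translStep m (k, v)).get? s
      = (m.get? s).or (if k = s then some v else if v = s then some k else none) := by
  unfold translStep
  by_cases hv : s = v
  · subst hv
    rw [PySem.Dict.get?_setdefault_self]
    by_cases hk : k = s
    · subst hk
      rw [PySem.Dict.get?_setdefault_self]
      cases m.get? k <;> simp
    · rw [PySem.Dict.get?_setdefault_of_ne _ _ (Ne.symm hk)]
      cases m.get? s <;> simp [if_neg hk]
  · rw [PySem.Dict.get?_setdefault_of_ne _ _ hv]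
    by_cases hk : k = s
    · subst hk
      rw [PySem.Dict.get?_setdefault_self]
      cases m.get? k <;> simp
    · rw [PySem.Dict.get?_setdefault_of_ne _ _ (Ne.symm hk)]
      cases m.get? s <;> simp [if_neg hk, if_neg (Ne.symm hv)]

theorem pvFold_get (s : String) :
    ∀ (d : List (String × String)) (m : PySem.Dict String String),
      (d.foldl translStep m).get? s = (m.get? s).or (pvScan s d) := by
  intro d
  induction d with
  | nil => intro m; simp [pvScan]
  | cons p r ih =>
    intro m
    obtain ⟨k, v⟩ := p
    simp only [List.foldl_cons, ih, pvStep_get, pvScan, Option.or_assoc]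
    by_cases hk : k = s
    · simp [hk]
    · by_cases hv : v = s <;> simp [hk, hv]

theorem pvScan_isSome (s : String) :
    ∀ (d : List (String × String)),
      s ∈ d.map Prod.fst ∨ s ∈ d.map Prod.snd → (pvScan s d).isSome := by
  intro d
  induction d with
  | nil => simp
  | cons p r ih =>
    obtain ⟨k, v⟩ := p
    intro h
    simp only [pvScan]
    by_cases hk : k = s
    · simp [hk]
    · by_cases hv : v = s
      · simp [hv, if_neg hk]
      · rw [if_neg hk, if_neg hv]
        apply ih
        simp only [List.map_cons, List.mem_cons] at h
        rcases h with (h | h) | (h | h)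
        · exact absurd h.symm hk
        · exact Or.inl h
        · exact absurd h.symm hv
        · exact Or.inr h

theorem pvScan_none (s : String) (d : List (String × String))
    (h1 : s ∉ d.map Prod.fst) (h2 : s ∉ d.map Prod.snd) : pvScan s d = none := by
  induction d with
  | nil => rfl
  | cons p r ih =>
    obtain ⟨k, v⟩ := p
    simp only [List.map_cons, List.mem_cons, not_or] at h1 h2
    simp only [pvScan, if_neg (fun h => h1.1 h.symm : ¬ k = s),
      if_neg (fun h => h2.1 h.symm : ¬ v = s)]
    exact ih h1.2 h2.2

theorem pvGo_eq_scan (d : List (String × String)) (s : String)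
    (hmem : s ∈ d.map Prod.fst ∨ s ∈ d.map Prod.snd) :
    ∀ l, translGo d s l = pvScan s l := by
  intro l
  induction l with
  | nil => rfl
  | cons p r ih =>
    obtain ⟨k, v⟩ := p
    simp only [translGo, pvScan]
    have hcond : ¬ (s ∉ d.map Prod.snd ∧ s ∉ d.map Prod.fst) := by
      rcases hmem with h | h
      · exact fun hc => hc.2 h
      · exact fun hc => hc.1 h
    rw [if_neg hcond, ih]

-- ===== VERDICT (by name: the statement is the Claim_ definition above) =====
theorem transl_spec : Claim_equal_transl := by
  intro d s _
  unfold Spec_transl transl transl_alt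
  cases hd : d with
  | nil => rfl
  | cons p r =>
    obtain ⟨k, v⟩ := p
    rw [if_neg (by simp)]
    have hget : ((((k, v) :: r).foldl translStep PySem.Dict.empty).get? s)
        = pvScan s ((k, v) :: r) := by
      rw [pvFold_get]
      rw [PySem.Dict.get?_empty, Option.none_or]
    have hgetD : ((((k, v) :: r).foldl translStep PySem.Dict.empty).getD s "Unknown")
        = (pvScan s ((k, v) :: r)).getD "Unknown" := by
      rw [PySem.Dict.getD_eq_get?_getD, hget]
    by_cases hmem : s ∈ (((k, v) :: r).map Prod.fst) ∨ s ∈ (((k, v) :: r).map Prod.snd)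
    · rw [pvGo_eq_scan _ _ hmem]
      have hs := pvScan_isSome s _ hmem
      cases hv : pvScan s ((k, v) :: r) with
      | none => rw [hv] at hs; simp at hs
      | some w => rw [hgetD, hv, Option.getD_some]
    · rw [not_or] at hmem
      obtain ⟨h1, h2⟩ := hmem
      simp only [List.map_cons, List.mem_cons, not_or] at h1 h2
      have hsc : pvScan s ((k, v) :: r) = none := by
        apply pvScan_none
        · simp only [List.map_cons, List.mem_cons, not_or]; exact h1
        · simp only [List.map_cons, List.mem_cons, not_or]; exact h2
      have hA : translGo ((k, v) :: r) s ((k, v) :: r) = some "Unknown" := by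
        simp only [translGo, if_neg (fun h => h1.1 h.symm : ¬ k = s),
          if_neg (fun h => h2.1 h.symm : ¬ v = s)]
        rw [if_pos]
        constructor
        · simp only [List.map_cons, List.mem_cons, not_or]; exact h2
        · simp only [List.map_cons, List.mem_cons, not_or]; exact h1
      rw [hA, hgetD, hsc, Option.getD_none]
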